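-- pv_equiv track=rewrite | github.com/gleebuss/SystemAnalysis | task2/task.py | find_subnodes_with_levels
-- ===== SOURCE A (Python) =====
-- def find_subnodes_with_levels(graph, start_node):
--     def dfs(node, level, visited):
--         visited[node] = level
--         for neighbor in graph.get(node, []):
--             if neighbor not in visited:
--                 dfs(neighbor, level + 1, visited)
--
--     visited = {}
--     dfs(start_node, 0, visited)
--
--     visited.pop(start_node, None)
--
--     return visited
-- ===== SOURCE B (Python) =====
-- def find_subnodes_with_levels(graph, start_node):
--     # Path-stack DFS: the stack holds one frame of still-unprocessed neighbors per
--     # node on the current DFS path; a node's level is the stack depth when found.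
--     visited = {start_node: 0}
--     stack = [graph.get(start_node, [])]
--     while stack:
--         frame = stack[-1]
--         if not frame:
--             stack.pop()
--             continue
--         node, stack[-1] = frame[0], frame[1:]
--         if node not in visited:
--             visited[node] = len(stack)
--             stack.append(graph.get(node, []))
--     visited.pop(start_node)
--     return visited
-- ===== Notes on version B (the rewrite author's own statement) =====
-- stated objective: alternative
-- what changed: Replaced the recursive DFS helper carrying an explicit level argument with an iterative path-stack DFS: the stack holds one frame of remaining neighbors per node on the current DFS path, and a node's level is read off as the stack depth at discovery.
import Mathlib
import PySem

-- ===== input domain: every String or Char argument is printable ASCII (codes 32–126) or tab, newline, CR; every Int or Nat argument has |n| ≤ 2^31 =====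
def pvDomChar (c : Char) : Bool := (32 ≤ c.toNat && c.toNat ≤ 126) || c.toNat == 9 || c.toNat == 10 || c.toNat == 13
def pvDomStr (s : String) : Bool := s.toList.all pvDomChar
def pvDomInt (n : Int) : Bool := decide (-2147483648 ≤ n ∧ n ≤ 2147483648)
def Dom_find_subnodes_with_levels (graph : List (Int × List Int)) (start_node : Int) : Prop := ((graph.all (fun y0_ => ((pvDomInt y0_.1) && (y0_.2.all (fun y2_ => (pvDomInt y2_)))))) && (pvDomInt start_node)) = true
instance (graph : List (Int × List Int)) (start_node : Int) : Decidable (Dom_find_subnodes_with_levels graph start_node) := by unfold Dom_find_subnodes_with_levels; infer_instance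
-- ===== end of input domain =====

-- B replaces A's recursive DFS helper (which carries the level as an argument) by an
-- iterative path-stack DFS whose stack holds one frame of remaining neighbors per node on
-- the current DFS path; a node's level is the stack depth at discovery: alternative decomposition.

-- shared helper: the port of `graph.get(node, [])` (first-match association-list lookup)
def pvNbrs (graph : List (Int × List Int)) (n : Int) : List Int :=
  match graph with
  | [] => []
  | (k, vs) :: rest => if k = n then vs else pvNbrs rest n

-- ===== PORT A =====
-- A's inner recursive `dfs`; the Nat argument is only a termination guard (fuel), chosen
-- large enough below that it is never exhausted (each recursive call visits a fresh node).
def pvDfsA (graph : List (Int × List Int)) : Nat → Int → Int → PySem.Dict Int Int → PySem.Dict Int Int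
  | 0, _, _, visited => visited
  | f + 1, node, level, visited =>
      (pvNbrs graph node).foldl
        (fun acc nb => if acc.contains nb then acc else pvDfsA graph f nb (level + 1) acc)
        (visited.insert node level)

def find_subnodes_with_levels (graph : List (Int × List Int)) (start_node : Int) : List (Int × Int) :=
  let visited := pvDfsA graph (start_node :: graph.flatMap (fun p => p.2)).length start_node 0 PySem.Dict.empty
  (visited.erase start_node).items

-- ===== PORT B =====
-- B's while-loop over the frame stack (head = top frame); the Nat argument is only a
-- termination guard (fuel), chosen large enough below that it is never exhausted
-- (every iteration either drops an empty frame, consumes one element, or consumes one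
-- element while visiting a fresh node).
def pvStackB (graph : List (Int × List Int)) : Nat → List (List Int) → PySem.Dict Int Int → PySem.Dict Int Int
  | _, [], visited => visited
  | 0, _ :: _, visited => visited
  | f + 1, [] :: st, visited => pvStackB graph f st visited
  | f + 1, (node :: frame) :: st, visited =>
      if visited.contains node then pvStackB graph f (frame :: st) visited
      else
        pvStackB graph f (pvNbrs graph node :: frame :: st)
          (visited.insert node ((frame :: st).length : Int))

def find_subnodes_with_levels_alt (graph : List (Int × List Int)) (start_node : Int) : List (Int × Int) :=
  let fuel := 1 + (pvNbrs graph start_node).length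
      + ((start_node :: graph.flatMap (fun p => p.2)).map (fun x => 1 + (pvNbrs graph x).length)).sum
  let visited := pvStackB graph fuel [pvNbrs graph start_node]
      ((PySem.Dict.empty : PySem.Dict Int Int).insert start_node 0)
  (visited.erase start_node).items

-- ===== PRECONDITION & SPEC =====
def Spec_find_subnodes_with_levels (graph : List (Int × List Int)) (start_node : Int) (out : List (Int × Int)) : Prop := out = find_subnodes_with_levels_alt graph start_node
instance (graph : List (Int × List Int)) (start_node : Int) (out : List (Int × Int)) : Decidable (Spec_find_subnodes_with_levels graph start_node out) := by unfold Spec_find_subnodes_with_levels; infer_instance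

-- ===== CLAIM (what is proved, stated in full; the proofs are below) =====
def Claim_equal_find_subnodes_with_levels : Prop := ∀ (graph : List (Int × List Int)) (start_node : Int), Dom_find_subnodes_with_levels graph start_node → Spec_find_subnodes_with_levels graph start_node (find_subnodes_with_levels graph start_node)

-- ===== LEMMAS AND PROOFS =====

-- the universe of nodes that can ever become visited
def pvUniv (graph : List (Int × List Int)) (start : Int) : List Int :=
  start :: graph.flatMap (fun p => p.2)

-- number of still-unvisited universe nodes
def pvMu (graph : List (Int × List Int)) (start : Int) (v : PySem.Dict Int Int) : Nat :=
  ((pvUniv graph start).toFinset.filter (fun x => v.contains x = false)).card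

lemma pv_filter_insert (graph : List (Int × List Int)) (start : Int)
    (v : PySem.Dict Int Int) (n : Int) (l : Int) :
    (pvUniv graph start).toFinset.filter (fun x => (v.insert n l).contains x = false)
      = ((pvUniv graph start).toFinset.filter (fun x => v.contains x = false)).erase n := by
  ext x
  simp [Finset.mem_filter, Finset.mem_erase, PySem.Dict.contains_insert, and_comm, and_assoc,
    and_left_comm]

lemma pvMu_insert_lt (graph : List (Int × List Int)) (start : Int)
    (v : PySem.Dict Int Int) (n : Int) (l : Int)
    (hmem : n ∈ pvUniv graph start) (hnv : v.contains n = false) :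
    pvMu graph start (v.insert n l) < pvMu graph start v := by
  unfold pvMu
  rw [pv_filter_insert]
  exact Finset.card_erase_lt_of_mem (by simp [Finset.mem_filter, hmem, hnv])

-- the common mathematical worklist DFS both ports compute
def pvW (graph : List (Int × List Int)) (start : Int) : List (Int × Int) → PySem.Dict Int Int → PySem.Dict Int Int
  | [], v => v
  | (n, l) :: s, v =>
      if h : v.contains n = true ∨ n ∉ pvUniv graph start then pvW graph start s v
      else
        pvW graph start ((pvNbrs graph n).map (fun nb => (nb, l + 1)) ++ s) (v.insert n l)
termination_by s v => (pvMu graph start v, s.length)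
decreasing_by
  · exact Prod.Lex.right _ (by simp)
  · exact Prod.Lex.left _ _
      (pvMu_insert_lt graph start v n l (by tauto) (by simpa using (not_or.mp h).1))

lemma pvW_nil (graph : List (Int × List Int)) (start : Int) (v : PySem.Dict Int Int) :
    pvW graph start [] v = v := by simp [pvW]

lemma pvW_skip (graph : List (Int × List Int)) (start : Int) (n l : Int)
    (s : List (Int × Int)) (v : PySem.Dict Int Int)
    (h : v.contains n = true ∨ n ∉ pvUniv graph start) :
    pvW graph start ((n, l) :: s) v = pvW graph start s v := by
  rw [pvW]; simp [h]

lemma pvW_go (graph : List (Int × List Int)) (start : Int) (n l : Int)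
    (s : List (Int × Int)) (v : PySem.Dict Int Int)
    (h1 : v.contains n = false) (h2 : n ∈ pvUniv graph start) :
    pvW graph start ((n, l) :: s) v
      = pvW graph start ((pvNbrs graph n).map (fun nb => (nb, l + 1)) ++ s) (v.insert n l) := by
  rw [pvW]; simp [h1, h2]

-- membership in the dict only grows along pvW
lemma pvW_contains_mono (graph : List (Int × List Int)) (start : Int)
    (s : List (Int × Int)) (v : PySem.Dict Int Int) (x : Int)
    (hx : v.contains x = true) : (pvW graph start s v).contains x = true := by
  fun_induction pvW graph start s v with
  | case1 v => exact hx
  | case2 n l s v h ih => exact ih hx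
  | case3 n l s v h ih =>
      exact ih (by simp [PySem.Dict.contains_insert, hx])

lemma pvMu_anti (graph : List (Int × List Int)) (start : Int)
    (s : List (Int × Int)) (v : PySem.Dict Int Int) :
    pvMu graph start (pvW graph start s v) ≤ pvMu graph start v := by
  apply Finset.card_le_card
  intro x hx
  simp only [Finset.mem_filter] at hx ⊢
  refine ⟨hx.1, ?_⟩
  by_contra hc
  have : v.contains x = true := by
    cases hv : v.contains x with
    | false => exact absurd hv (by intro h; exact hc (by simp [h])
      )
    | true => rfl
  have := pvW_contains_mono graph start s v x this
  simp [this] at hx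

-- processing an appended worklist = processing the pieces in order
lemma pvW_append (graph : List (Int × List Int)) (start : Int) :
    ∀ (k : Nat) (a b : List (Int × Int)) (v : PySem.Dict Int Int),
      pvMu graph start v ≤ k →
      pvW graph start (a ++ b) v = pvW graph start b (pvW graph start a v) := by
  intro k
  induction k with
  | zero =>
      intro a b v hk
      induction a generalizing v with
      | nil => simp [pvW_nil]
      | cons hd tl ih =>
          obtain ⟨n, l⟩ := hd
          by_cases hg : v.contains n = true ∨ n ∉ pvUniv graph start
          · rw [List.cons_append, pvW_skip _ _ _ _ _ _ hg, pvW_skip _ _ _ _ _ _ hg]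
            exact ih v hk
          · push_neg at hg
            obtain ⟨h1, h2⟩ := hg
            have h1' : v.contains n = false := by simpa using h1
            have := pvMu_insert_lt graph start v n l h2 h1'
            omega
  | succ k ih =>
      intro a b v hk
      induction a generalizing v with
      | nil => simp [pvW_nil]
      | cons hd tl iha =>
          obtain ⟨n, l⟩ := hd
          by_cases hg : v.contains n = true ∨ n ∉ pvUniv graph start
          · rw [List.cons_append, pvW_skip _ _ _ _ _ _ hg, pvW_skip _ _ _ _ _ _ hg]
            exact iha v hk
          · push_neg at hg
            obtain ⟨h1, h2⟩ := hg
            have h1' : v.contains n = false := by simpa using h1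
            rw [List.cons_append, pvW_go _ _ _ _ _ _ h1' h2, pvW_go _ _ _ _ _ _ h1' h2,
              ← List.append_assoc]
            apply ih
            have := pvMu_insert_lt graph start v n l h2 h1'
            omega

lemma pv_mem_nbrs (graph : List (Int × List Int)) (n x : Int)
    (hx : x ∈ pvNbrs graph n) : x ∈ graph.flatMap (fun p => p.2) := by
  induction graph with
  | nil => simp [pvNbrs] at hx
  | cons hd tl ih =>
      obtain ⟨k, vs⟩ := hd
      simp only [pvNbrs] at hx
      by_cases hk : k = n
      · simp [hk] at hx
        simp [List.mem_flatMap]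
        exact Or.inl hx
      · simp [hk] at hx
        simp [List.mem_flatMap]
        rcases List.mem_flatMap.mp (ih hx) with ⟨p, hp, hxp⟩
        exact Or.inr ⟨p.1, p.2, hp, hxp⟩

lemma pv_mem_nbrs_univ (graph : List (Int × List Int)) (start n x : Int)
    (hx : x ∈ pvNbrs graph n) : x ∈ pvUniv graph start := by
  unfold pvUniv
  exact List.mem_cons_of_mem _ (pv_mem_nbrs graph n x hx)

-- ===== A-side: pvDfsA with sufficient fuel computes pvW on a singleton worklist =====
lemma pvDfsA_eq_W (graph : List (Int × List Int)) (start : Int) :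
    ∀ (k : Nat) (n l : Int) (v : PySem.Dict Int Int) (f : Nat),
      pvMu graph start v ≤ k → pvMu graph start v ≤ f →
      n ∈ pvUniv graph start → v.contains n = false →
      pvDfsA graph f n l v = pvW graph start [(n, l)] v := by
  intro k
  induction k using Nat.strong_induction_on with
  | _ k IH =>
    intro n l v f hk hf hn hnv
    have hmu : 1 ≤ pvMu graph start v := by
      have : n ∈ (pvUniv graph start).toFinset.filter (fun x => v.contains x = false) := by
        simp [Finset.mem_filter, hn, hnv]
      have := Finset.card_pos.mpr ⟨n, this⟩
      unfold pvMu; omega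
    obtain ⟨f', rfl⟩ : ∃ f', f = f' + 1 := ⟨f - 1, by omega⟩
    rw [pvW_go _ _ _ _ _ _ hnv hn, List.append_nil]
    rw [pvDfsA]
    set m := pvMu graph start (v.insert n l) with hm
    have hmlt : m < pvMu graph start v := pvMu_insert_lt graph start v n l hn hnv
    have hnb : ∀ x ∈ pvNbrs graph n, x ∈ pvUniv graph start :=
      fun x hx => pv_mem_nbrs_univ graph start n x hx
    -- fold over the neighbor list = pvW on the mapped worklist
    have fold : ∀ (rest : List Int) (w : PySem.Dict Int Int),
        (∀ x ∈ rest, x ∈ pvUniv graph start) →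
        pvMu graph start w ≤ m →
        rest.foldl (fun acc nb => if acc.contains nb then acc else pvDfsA graph f' nb (l + 1) acc) w
          = pvW graph start (rest.map (fun nb => (nb, l + 1))) w := by
      intro rest
      induction rest with
      | nil => intro w _ _; simp [pvW_nil]
      | cons x tl ihr =>
          intro w hrest hw
          simp only [List.foldl_cons, List.map_cons]
          have hxu : x ∈ pvUniv graph start := hrest x (by simp)
          cases hc : w.contains x with
          | true =>
              rw [pvW_skip _ _ _ _ _ _ (Or.inl hc)]
              simp only [hc, if_true]
              exact ihr w (fun y hy => hrest y (by simp [hy])) hw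
          | false =>
              simp only [hc, Bool.false_eq_true, if_false]
              have hcall : pvDfsA graph f' x (l + 1) w = pvW graph start [(x, l + 1)] w := by
                apply IH (pvMu graph start w) (by omega) x (l + 1) w f' le_rfl (by omega) hxu hc
              rw [hcall]
              have hstep : pvW graph start ((x, l + 1) :: tl.map (fun nb => (nb, l + 1))) w
                  = pvW graph start (tl.map (fun nb => (nb, l + 1))) (pvW graph start [(x, l + 1)] w) := by
                have := pvW_append graph start (pvMu graph start w)
                  [(x, l + 1)] (tl.map (fun nb => (nb, l + 1))) w le_rfl
                simpa using this
              rw [hstep]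
              apply ihr _ (fun y hy => hrest y (by simp [hy]))
              calc pvMu graph start (pvW graph start [(x, l + 1)] w)
                  ≤ pvMu graph start w := pvMu_anti graph start _ w
                _ ≤ m := hw
    rw [fold (pvNbrs graph n) (v.insert n l) hnb (le_of_eq hm.symm)]

-- ===== B-side =====
-- the worklist a frame stack denotes: elements of a frame with k frames below it carry level k+1
def pvToW : List (List Int) → List (Int × Int)
  | [] => []
  | ns :: st => ns.map (fun nb => (nb, ((st.length + 1 : Nat) : Int))) ++ pvToW st

-- remaining-iteration bound for B's loop
def pvNuB (graph : List (Int × List Int)) (start : Int)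
    (stack : List (List Int)) (v : PySem.Dict Int Int) : Nat :=
  stack.length + (stack.map List.length).sum +
    ∑ x ∈ (pvUniv graph start).toFinset.filter (fun x => v.contains x = false),
      (1 + (pvNbrs graph x).length)

-- B's frame-stack loop with sufficient fuel computes pvW on the denoted worklist
lemma pvStackB_eq_W (graph : List (Int × List Int)) (start : Int) :
    ∀ (f : Nat) (stack : List (List Int)) (v : PySem.Dict Int Int),
      (∀ ns ∈ stack, ∀ x ∈ ns, x ∈ pvUniv graph start) →
      pvNuB graph start stack v ≤ f →
      pvStackB graph f stack v = pvW graph start (pvToW stack) v := by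
  intro f
  induction f with
  | zero =>
      intro stack v _ hf
      cases stack with
      | nil => simp [pvStackB, pvToW, pvW_nil]
      | cons ns st => unfold pvNuB at hf; simp at hf
  | succ f ih =>
      intro stack v hinv hf
      match stack with
      | [] => simp [pvStackB, pvToW, pvW_nil]
      | [] :: st =>
          rw [pvStackB]
          have : pvToW ([] :: st) = pvToW st := by simp [pvToW]
          rw [this]
          apply ih st v (fun ns hns => hinv ns (by simp [hns]))
          unfold pvNuB at hf ⊢; simp at hf ⊢; omega
      | (n :: frame) :: st =>
          rw [pvStackB]
          have hn : n ∈ pvUniv graph start := hinv (n :: frame) (by simp) n (by simp)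
          have htow : pvToW ((n :: frame) :: st)
              = (n, ((st.length + 1 : Nat) : Int)) :: pvToW (frame :: st) := by
            simp [pvToW]
          have hinv' : ∀ ns ∈ frame :: st, ∀ x ∈ ns, x ∈ pvUniv graph start := by
            intro ms hms x hx
            rcases List.mem_cons.mp hms with h | h
            · exact hinv (n :: frame) (by simp) x (by rw [h] at hx; simp [hx])
            · exact hinv ms (by simp [h]) x hx
          cases hc : v.contains n with
          | true =>
              simp only [if_true]
              rw [htow, pvW_skip _ _ _ _ _ _ (Or.inl hc)]
              apply ih (frame :: st) v hinv'
              unfold pvNuB at hf ⊢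
              simp only [List.length_cons, List.map_cons, List.sum_cons] at hf ⊢
              omega
          | false =>
              simp only [Bool.false_eq_true, if_false]
              rw [htow, pvW_go _ _ _ _ _ _ hc hn]
              have hlvl : ((st.length + 1 : Nat) : Int) = (((frame :: st).length : Nat) : Int) := by
                simp
              have hlvl1 : ((st.length + 1 : Nat) : Int) + 1
                  = (((frame :: st).length + 1 : Nat) : Int) := by
                simp only [List.length_cons]; push_cast; ring
              have htow2 : (pvNbrs graph n).map (fun nb => (nb, ((st.length + 1 : Nat) : Int) + 1))
                    ++ pvToW (frame :: st)
                  = pvToW (pvNbrs graph n :: frame :: st) := by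
                simp only [pvToW, hlvl1]
              rw [htow2, hlvl]
              apply ih (pvNbrs graph n :: frame :: st) (v.insert n (((frame :: st).length : Nat) : Int))
              · intro ms hms x hx
                rcases List.mem_cons.mp hms with h | h
                · exact pv_mem_nbrs_univ graph start n x (by rw [h] at hx; exact hx)
                · exact hinv' ms h x hx
              · have hnfin : n ∈ (pvUniv graph start).toFinset.filter
                    (fun x => v.contains x = false) := by
                  simp [Finset.mem_filter, hn, hc]
                have hsum :
                    (∑ x ∈ (pvUniv graph start).toFinset.filter
                        (fun x => (v.insert n (((frame :: st).length : Nat) : Int)).contains x = false),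
                        (1 + (pvNbrs graph x).length))
                      + (1 + (pvNbrs graph n).length)
                    = ∑ x ∈ (pvUniv graph start).toFinset.filter (fun x => v.contains x = false),
                        (1 + (pvNbrs graph x).length) := by
                  rw [pv_filter_insert]
                  exact Finset.sum_erase_add _ _ hnfin
                unfold pvNuB at hf ⊢
                simp only [List.length_cons, List.map_cons, List.sum_cons] at hf hsum ⊢
                omega

-- list sum dominates the Finset sum over its toFinset
lemma pv_sum_toFinset_le (l : List Int) (f : Int → Nat) :
    (∑ x ∈ l.toFinset, f x) ≤ (l.map f).sum := by
  induction l with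
  | nil => simp
  | cons hd tl ih =>
      simp only [List.toFinset_cons, List.map_cons, List.sum_cons]
      by_cases h : hd ∈ tl.toFinset
      · rw [Finset.insert_eq_self.mpr h]; omega
      · rw [Finset.sum_insert h]; omega

lemma pvMu_le_len (graph : List (Int × List Int)) (start : Int) (v : PySem.Dict Int Int) :
    pvMu graph start v ≤ (pvUniv graph start).length :=
  le_trans (Finset.card_le_card (Finset.filter_subset _ _)) (List.toFinset_card_le _)

-- ===== VERDICT (by name: the statement is the Claim_ definition above) =====
theorem find_subnodes_with_levels_spec : Claim_equal_find_subnodes_with_levels := by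
  intro graph start _
  unfold Spec_find_subnodes_with_levels find_subnodes_with_levels find_subnodes_with_levels_alt
  simp only []
  have hstart : start ∈ pvUniv graph start := by simp [pvUniv]
  have hempty : (PySem.Dict.empty : PySem.Dict Int Int).contains start = false := by
    simp [PySem.Dict.contains_empty]
  have hA : pvDfsA graph (start :: graph.flatMap (fun p => p.2)).length start 0 PySem.Dict.empty
      = pvW graph start [(start, 0)] PySem.Dict.empty := by
    apply pvDfsA_eq_W graph start (pvMu graph start PySem.Dict.empty) start 0 _ _ le_rfl
      ?_ hstart hempty
    exact pvMu_le_len graph start _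
  have hAW : pvW graph start [(start, 0)] PySem.Dict.empty
      = pvW graph start ((pvNbrs graph start).map (fun nb => (nb, (0 : Int) + 1)))
          (PySem.Dict.empty.insert start 0) := by
    rw [pvW_go _ _ _ _ _ _ hempty hstart, List.append_nil]
  have hB : pvStackB graph
      (1 + (pvNbrs graph start).length
        + ((start :: graph.flatMap (fun p => p.2)).map (fun x => 1 + (pvNbrs graph x).length)).sum)
      [pvNbrs graph start] (PySem.Dict.empty.insert start 0)
      = pvW graph start (pvToW [pvNbrs graph start]) (PySem.Dict.empty.insert start 0) := by
    apply pvStackB_eq_W graph start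
    · intro ns hns x hx
      simp at hns; subst hns
      exact pv_mem_nbrs_univ graph start start x hx
    · unfold pvNuB
      simp only [List.length_cons, List.length_nil, List.map_cons, List.map_nil,
        List.sum_cons, List.sum_nil]
      have hsub : (∑ x ∈ (pvUniv graph start).toFinset.filter
            (fun x => (PySem.Dict.empty.insert start (0 : Int)).contains x = false),
            (1 + (pvNbrs graph x).length))
          ≤ ∑ x ∈ (pvUniv graph start).toFinset, (1 + (pvNbrs graph x).length) :=
        Finset.sum_le_sum_of_subset (Finset.filter_subset _ _)
      have hle := pv_sum_toFinset_le (pvUniv graph start) (fun x => 1 + (pvNbrs graph x).length)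
      simp only [pvUniv, List.map_cons, List.sum_cons] at hle hsub ⊢
      omega
  have htow : pvToW [pvNbrs graph start]
      = (pvNbrs graph start).map (fun nb => (nb, (0 : Int) + 1)) := by
    simp [pvToW]
  rw [hA, hAW, hB, htow]
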